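-- pv_equiv track=rewrite | github.com/alexanderbackup/Python-backup | hackbulgaria/week07/TestExercise/strawberries.py | strawberries
-- ===== SOURCE A (Python) =====
-- from copy import deepcopy
--
-- def strawberries(rows, columns, days, dead_strawberries: list):
--     if not(0 < columns <= rows <= 1000):
--         raise ValueError()
--     if not(0 <= days <= 1000):
--         raise ValueError()
--     field = [[True for i in range(columns)] for i in range(rows)]
--     valid_cords = set()
--     for row in range(len(field)):
--         for col in range(len(field[row])):
--             valid_cords.add((row, col))
--             if (row, col) in dead_strawberries:
--                 field[row][col] = False
--     iter_field = [deepcopy(i) for i in field]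
--     while days+1:
--         alive = 0
--         for row in range(len(iter_field)):
--             for col in range(len(iter_field[row])):
--                 if not iter_field[row][col]:
--                     #decay(row, col)
--                     if (row, col-1) in valid_cords:
--                         field[row][col-1] = False
--                     if (row, col+1) in valid_cords:
--                         field[row][col+1] = False
--                     if (row-1, col) in valid_cords:
--                         field[row-1][col] = False
--                     if (row+1, col) in valid_cords:
--                         field[row+1][col] = False
--                 else:
--                     alive += 1
--         iter_field = [deepcopy(i) for i in field]
--         days -= 1
--     return alive
-- ===== SOURCE B (Python) =====
-- def strawberries(rows, columns, days, dead_strawberries: list):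
--     if not(0 < columns <= rows <= 1000):
--         raise ValueError()
--     if not(0 <= days <= 1000):
--         raise ValueError()
--     dead = {(r, c) for (r, c) in dead_strawberries
--             if 0 <= r < rows and 0 <= c < columns}
--     frontier = dead
--     for _ in range(days):
--         new = set()
--         for (r, c) in frontier:
--             for q in ((r, c - 1), (r, c + 1), (r - 1, c), (r + 1, c)):
--                 if 0 <= q[0] < rows and 0 <= q[1] < columns and q not in dead:
--                     new.add(q)
--         dead |= new
--         frontier = new
--     return rows * columns - len(dead)
-- ===== Notes on version B (the rewrite author's own statement) =====
-- stated objective: faster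
-- what changed: Replaces the day-by-day rescan of the whole boolean grid (each day touches every cell) with a multi-source BFS frontier over a set of dead coordinates, so each cell is processed once and the final count is rows*columns - len(dead).
import Mathlib
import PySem

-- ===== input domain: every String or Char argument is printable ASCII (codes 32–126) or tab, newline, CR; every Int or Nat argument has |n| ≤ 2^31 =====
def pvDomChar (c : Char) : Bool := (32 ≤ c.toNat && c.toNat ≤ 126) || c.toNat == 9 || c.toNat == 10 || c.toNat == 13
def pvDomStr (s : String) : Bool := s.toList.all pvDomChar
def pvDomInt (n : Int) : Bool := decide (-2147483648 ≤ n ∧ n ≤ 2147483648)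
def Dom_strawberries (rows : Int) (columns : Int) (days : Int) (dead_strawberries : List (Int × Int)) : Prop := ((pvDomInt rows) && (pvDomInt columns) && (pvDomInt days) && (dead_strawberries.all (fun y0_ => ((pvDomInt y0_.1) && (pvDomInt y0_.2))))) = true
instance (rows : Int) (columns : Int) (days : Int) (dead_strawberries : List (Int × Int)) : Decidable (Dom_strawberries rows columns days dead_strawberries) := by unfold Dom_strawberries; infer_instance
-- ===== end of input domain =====

-- B replaces A's day-by-day rescan of the whole boolean grid by a multi-source BFS frontier
-- over a set of dead coordinates (objective: faster).

-- ===== PORT A =====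
-- Every grid read/write in A is guarded to a nonnegative in-range index (by the loop
-- ranges resp. the valid_cords membership test), so Nat indexing via .toNat is exact here.
def pvGridGet (g : List (List Bool)) (r c : Int) : Bool :=
  List.getD (List.getD g r.toNat []) c.toNat true

def pvGridSet (g : List (List Bool)) (r c : Int) : List (List Bool) :=
  List.modify g r.toNat (fun row => List.set row c.toNat false)

-- the four guarded neighbour kills of A's "decay" block
def pvKill (valid : PySem.Set (Int × Int)) (f : List (List Bool)) (r c : Int) :
    List (List Bool) :=
  let f1 := if PySem.Set.contains valid (r, c - 1) then pvGridSet f r (c - 1) else f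
  let f2 := if PySem.Set.contains valid (r, c + 1) then pvGridSet f1 r (c + 1) else f1
  let f3 := if PySem.Set.contains valid (r - 1, c) then pvGridSet f2 (r - 1) c else f2
  if PySem.Set.contains valid (r + 1, c) then pvGridSet f3 (r + 1) c else f3

def pvSpreadCell (valid : PySem.Set (Int × Int)) (iterG : List (List Bool))
    (r c : Int) (st : List (List Bool) × Int) : List (List Bool) × Int :=
  if !(pvGridGet iterG r c) then (pvKill valid st.1 r c, st.2) else (st.1, st.2 + 1)

def pvSpread (valid : PySem.Set (Int × Int)) (iterG field : List (List Bool)) :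
    List (List Bool) × Int :=
  (List.range iterG.length).foldl (fun st (r : Nat) =>
    (List.range (List.getD iterG r []).length).foldl (fun st (c : Nat) =>
      pvSpreadCell valid iterG (r : Int) (c : Int) st) st) (field, 0)

def pvWhileA (valid : PySem.Set (Int × Int)) : Nat → List (List Bool) → Int
  | 0, _ => 0
  | fuel + 1, field =>
    let res := pvSpread valid field field
    match fuel with
    | 0 => res.2
    | m + 1 => pvWhileA valid (m + 1) res.1

def pvInitA (rows columns : Int) (dead : List (Int × Int)) :
    PySem.Set (Int × Int) × List (List Bool) :=
  (List.range rows.toNat).foldl (fun st (r : Nat) =>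
    (List.range columns.toNat).foldl (fun st (c : Nat) =>
      (PySem.Set.add st.1 ((r : Int), (c : Int)),
       if dead.contains ((r : Int), (c : Int)) then pvGridSet st.2 (r : Int) (c : Int)
       else st.2)) st)
    (PySem.Set.empty, List.replicate rows.toNat (List.replicate columns.toNat true))

def strawberries (rows : Int) (columns : Int) (days : Int) (dead_strawberries : List (Int × Int)) : Int :=
  if 0 < columns ∧ columns ≤ rows ∧ rows ≤ 1000 then
    if 0 ≤ days ∧ days ≤ 1000 then
      let st := pvInitA rows columns dead_strawberries
      pvWhileA st.1 ((days + 1).toNat) st.2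
    else 0  -- Python raises ValueError here; excluded by Pre_
  else 0    -- Python raises ValueError here; excluded by Pre_

-- ===== PORT B =====
def pvInGrid (rows columns : Int) (q : Int × Int) : Bool :=
  decide (0 ≤ q.1) && decide (q.1 < rows) && decide (0 ≤ q.2) && decide (q.2 < columns)

def pvNbrs (p : Int × Int) : List (Int × Int) :=
  [(p.1, p.2 - 1), (p.1, p.2 + 1), (p.1 - 1, p.2), (p.1 + 1, p.2)]

def pvBfsStep (rows columns : Int)
    (st : PySem.Set (Int × Int) × PySem.Set (Int × Int)) :
    PySem.Set (Int × Int) × PySem.Set (Int × Int) :=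
  let nf := st.2.foldl (fun (nf : PySem.Set (Int × Int)) p =>
      (pvNbrs p).foldl (fun nf q =>
        if pvInGrid rows columns q && !(PySem.Set.contains st.1 q) then PySem.Set.add nf q
        else nf) nf) PySem.Set.empty
  (PySem.Set.union st.1 nf, nf)

def strawberries_alt (rows : Int) (columns : Int) (days : Int) (dead_strawberries : List (Int × Int)) : Int :=
  if 0 < columns ∧ columns ≤ rows ∧ rows ≤ 1000 then
    if 0 ≤ days ∧ days ≤ 1000 then
      let dead0 : PySem.Set (Int × Int) :=
        PySem.Set.ofList (dead_strawberries.filter (pvInGrid rows columns))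
      let fin := (List.range days.toNat).foldl (fun st _ => pvBfsStep rows columns st)
        (dead0, dead0)
      rows * columns - (fin.1.length : Int)
    else 0
  else 0

-- ===== PRECONDITION & SPEC =====
-- Pre_ is exactly A's explicit validation: outside it Python raises ValueError.
def Pre_strawberries (rows : Int) (columns : Int) (days : Int) (dead_strawberries : List (Int × Int)) : Prop :=
  (0 < columns ∧ columns ≤ rows ∧ rows ≤ 1000) ∧ (0 ≤ days ∧ days ≤ 1000)
instance (rows : Int) (columns : Int) (days : Int) (dead_strawberries : List (Int × Int)) : Decidable (Pre_strawberries rows columns days dead_strawberries) := by unfold Pre_strawberries; infer_instance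

def pvWitness_strawberries : Int × Int × Int × (List (Int × Int)) := (2, 2, 1, [(0, 0)])

def Spec_strawberries (rows : Int) (columns : Int) (days : Int) (dead_strawberries : List (Int × Int)) (out : Int) : Prop := out = strawberries_alt rows columns days dead_strawberries
instance (rows : Int) (columns : Int) (days : Int) (dead_strawberries : List (Int × Int)) (out : Int) : Decidable (Spec_strawberries rows columns days dead_strawberries out) := by unfold Spec_strawberries; infer_instance

-- ===== CLAIM (what is proved, stated in full; the proofs are below) =====
def Claim_equal_strawberries : Prop := ∀ (rows : Int) (columns : Int) (days : Int) (dead_strawberries : List (Int × Int)), Dom_strawberries rows columns days dead_strawberries → Pre_strawberries rows columns days dead_strawberries → Spec_strawberries rows columns days dead_strawberries (strawberries rows columns days dead_strawberries)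

-- ===== LEMMAS AND PROOFS =====

-- The common model: the set of dead cells after k days, as a Boolean predicate.
def pvCells (R C : Nat) : List (Int × Int) :=
  (List.range R).flatMap (fun (r : Nat) => (List.range C).map (fun (c : Nat) => ((r : Int), (c : Int))))

def pvS0 (rows columns : Int) (dead : List (Int × Int)) : Int × Int → Bool :=
  fun p => pvInGrid rows columns p && dead.contains p

def pvSnext (rows columns : Int) (S : Int × Int → Bool) : Int × Int → Bool :=
  fun p => S p || (pvInGrid rows columns p && (pvNbrs p).any S)

def pvAlive (rows columns : Int) (S : Int × Int → Bool) : Int :=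
  ((pvCells rows.toNat columns.toNat).countP (fun p => !(S p)) : Int)

def GridDims (R C : Nat) (g : List (List Bool)) : Prop :=
  g.length = R ∧ ∀ row ∈ g, row.length = C

theorem mem_pvCells (rows columns : Int) (p : Int × Int) :
    p ∈ pvCells rows.toNat columns.toNat ↔ pvInGrid rows columns p = true := by
  rcases p with ⟨a, b⟩
  constructor
  · intro h
    simp only [pvCells, List.mem_flatMap, List.mem_map, List.mem_range] at h
    obtain ⟨r, hr, c, hc, heq⟩ := h
    injection heq with h1 h2
    subst h1; subst h2
    simp only [pvInGrid, Bool.and_eq_true, decide_eq_true_eq]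
    refine ⟨⟨⟨?_, ?_⟩, ?_⟩, ?_⟩ <;> omega
  · intro h
    simp only [pvInGrid, Bool.and_eq_true, decide_eq_true_eq] at h
    obtain ⟨⟨⟨h1, h2⟩, h3⟩, h4⟩ := h
    simp only [pvCells, List.mem_flatMap, List.mem_map, List.mem_range]
    refine ⟨a.toNat, by omega, b.toNat, by omega, ?_⟩
    rw [Int.toNat_of_nonneg h1, Int.toNat_of_nonneg h3]

theorem nodup_pvCells (R C : Nat) : (pvCells R C).Nodup := by
  induction R with
  | zero => simp [pvCells]
  | succ n ih =>
    simp only [pvCells] at ih ⊢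
    rw [List.range_succ, List.flatMap_append]
    refine List.Nodup.append ih ?_ ?_
    · simp only [List.flatMap_cons, List.flatMap_nil, List.append_nil]
      refine List.Nodup.map ?_ List.nodup_range
      intro c1 c2 hcc
      injection hcc with e1 e2
      exact_mod_cast e2
    · intro x hx hx2
      simp only [List.mem_flatMap, List.mem_map, List.mem_range] at hx
      simp only [List.flatMap_cons, List.flatMap_nil, List.append_nil,
        List.mem_map, List.mem_range] at hx2
      obtain ⟨r, hr, c, hc, heq⟩ := hx
      obtain ⟨c2, hc2, heq2⟩ := hx2
      rw [← heq2] at heq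
      injection heq with e1 e2
      omega

theorem length_pvCells (R C : Nat) : (pvCells R C).length = R * C := by
  induction R with
  | zero => simp [pvCells]
  | succ n ih =>
    simp only [pvCells] at ih ⊢
    rw [List.range_succ, List.flatMap_append, List.length_append, ih]
    simp [Nat.succ_mul]

theorem foldl_cells {σ : Type} (R C : Nat) (F : σ → Int × Int → σ) (init : σ) :
    (pvCells R C).foldl F init =
      (List.range R).foldl (fun st (r : Nat) =>
        (List.range C).foldl (fun st (c : Nat) => F st ((r : Int), (c : Int))) st) init := by
  simp [pvCells, List.foldl_flatMap, List.foldl_map]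

theorem pvNbrs_symm (p q : Int × Int) : q ∈ pvNbrs p ↔ p ∈ pvNbrs q := by
  rcases p with ⟨a, b⟩; rcases q with ⟨x, y⟩
  simp only [pvNbrs, List.mem_cons, List.not_mem_nil, or_false, Prod.ext_iff]
  omega

-- grid primitives
theorem GridDims_set (R C : Nat) (g : List (List Bool)) (h : GridDims R C g) (r c : Int) :
    GridDims R C (pvGridSet g r c) := by
  obtain ⟨hlen, hrow⟩ := h
  constructor
  · have hl2 : (pvGridSet g r c).length = g.length := by
      rw [pvGridSet, List.length_modify]
    rw [hl2, hlen]
  · intro row hmem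
    rw [pvGridSet, List.mem_iff_getElem?] at hmem
    obtain ⟨j, hj⟩ := hmem
    rw [List.getElem?_modify] at hj
    cases hg : g[j]? with
    | none => rw [hg] at hj; simp at hj
    | some row0 =>
      have hm : row0 ∈ g := List.mem_of_getElem? hg
      rw [hg] at hj
      have hj' : (if r.toNat = j then row0.set c.toNat false else row0) = row := by
        by_cases hrj : r.toNat = j
        · simpa [hrj] using hj
        · simpa [hrj] using hj
      rw [← hj']
      split <;> simp [List.length_set, hrow _ hm]

theorem pvGridGet_set (rows columns : Int) (g : List (List Bool))
    (h : GridDims rows.toNat columns.toNat g) (p : Int × Int) (qr qc : Int)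
    (hq : pvInGrid rows columns (qr, qc) = true) (hp : pvInGrid rows columns p = true) :
    pvGridGet (pvGridSet g qr qc) p.1 p.2 =
      if p = (qr, qc) then false else pvGridGet g p.1 p.2 := by
  obtain ⟨hlen, hrow⟩ := h
  rcases p with ⟨a, b⟩
  simp only [pvInGrid, Bool.and_eq_true, decide_eq_true_eq] at hq hp
  obtain ⟨⟨⟨hx0, hxr⟩, hy0⟩, hyc⟩ := hq
  obtain ⟨⟨⟨ha0, har⟩, hb0⟩, hbc⟩ := hp
  have halen : a.toNat < g.length := by omega
  have hga : g[a.toNat]? = some g[a.toNat] := List.getElem?_eq_getElem halen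
  have hrl : g[a.toNat].length = columns.toNat := hrow _ (List.getElem_mem halen)
  by_cases hra : qr.toNat = a.toNat
  · by_cases hcb : qc.toNat = b.toNat
    · have ha : a = qr := by omega
      have hb : b = qc := by omega
      subst ha; subst hb
      rw [if_pos rfl]
      have hblen : b.toNat < g[a.toNat].length := by rw [hrl]; omega
      simp [pvGridGet, pvGridSet, List.getD_eq_getElem?_getD, List.getElem?_modify, hga,
        List.getElem?_set, hblen]
    · have hpq : ¬(((a, b) : Int × Int) = (qr, qc)) := by
        simp only [Prod.ext_iff, not_and]
        intro _; omega
      rw [if_neg hpq]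
      simp [pvGridGet, pvGridSet, List.getD_eq_getElem?_getD, List.getElem?_modify, hga,
        hra, List.getElem?_set, hcb]
  · have hpq : ¬(((a, b) : Int × Int) = (qr, qc)) := by
      simp only [Prod.ext_iff, not_and]
      intro h1; exfalso; omega
    rw [if_neg hpq]
    simp [pvGridGet, pvGridSet, List.getD_eq_getElem?_getD, List.getElem?_modify, hga, hra]

theorem pvGridGet_replicate (rows columns : Int) (p : Int × Int)
    (hp : pvInGrid rows columns p = true) :
    pvGridGet (List.replicate rows.toNat (List.replicate columns.toNat true)) p.1 p.2 = true := by
  rcases p with ⟨a, b⟩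
  simp only [pvInGrid, Bool.and_eq_true, decide_eq_true_eq] at hp
  obtain ⟨⟨⟨h1, h2⟩, h3⟩, h4⟩ := hp
  simp [pvGridGet, List.getD_eq_getElem?_getD, List.getElem?_replicate,
    show a.toNat < rows.toNat by omega, show b.toNat < columns.toNat by omega]

theorem GridDims_replicate (R C : Nat) :
    GridDims R C (List.replicate R (List.replicate C true)) := by
  refine ⟨List.length_replicate, fun row hrow => ?_⟩
  rw [List.eq_of_mem_replicate hrow]
  exact List.length_replicate

-- one guarded write
theorem get_guardSet (rows columns : Int) (valid : PySem.Set (Int × Int))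
    (hvalid : ∀ q, PySem.Set.contains valid q = pvInGrid rows columns q)
    (f : List (List Bool)) (hf : GridDims rows.toNat columns.toNat f) (tr tc : Int) :
    GridDims rows.toNat columns.toNat
      (if PySem.Set.contains valid (tr, tc) then pvGridSet f tr tc else f) ∧
    ∀ p, pvInGrid rows columns p = true →
      pvGridGet (if PySem.Set.contains valid (tr, tc) then pvGridSet f tr tc else f) p.1 p.2 =
        (pvGridGet f p.1 p.2 && !(p == (tr, tc))) := by
  rw [hvalid]
  by_cases ht : pvInGrid rows columns (tr, tc) = true
  · rw [if_pos ht]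
    refine ⟨GridDims_set _ _ _ hf _ _, ?_⟩
    intro p hp
    rw [pvGridGet_set rows columns f hf p tr tc ht hp]
    by_cases hpt : p = (tr, tc)
    · simp [hpt]
    · simp [hpt]
  · rw [if_neg ht]
    refine ⟨hf, ?_⟩
    intro p hp
    have hpt : ¬(p = (tr, tc)) := fun h => ht (h ▸ hp)
    simp [hpt]

theorem pvKill_spec (rows columns : Int) (valid : PySem.Set (Int × Int))
    (hvalid : ∀ q, PySem.Set.contains valid q = pvInGrid rows columns q)
    (f : List (List Bool)) (hf : GridDims rows.toNat columns.toNat f) (r c : Int) :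
    GridDims rows.toNat columns.toNat (pvKill valid f r c) ∧
    ∀ p, pvInGrid rows columns p = true →
      pvGridGet (pvKill valid f r c) p.1 p.2 =
        (pvGridGet f p.1 p.2 && !((pvNbrs p).contains ((r, c) : Int × Int))) := by
  obtain ⟨hd1, hg1⟩ := get_guardSet rows columns valid hvalid f hf r (c - 1)
  obtain ⟨hd2, hg2⟩ := get_guardSet rows columns valid hvalid _ hd1 r (c + 1)
  obtain ⟨hd3, hg3⟩ := get_guardSet rows columns valid hvalid _ hd2 (r - 1) c
  obtain ⟨hd4, hg4⟩ := get_guardSet rows columns valid hvalid _ hd3 (r + 1) c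
  refine ⟨hd4, ?_⟩
  intro p hp
  show pvGridGet _ p.1 p.2 = _
  rw [show pvKill valid f r c =
    (if PySem.Set.contains valid (r + 1, c) then
      pvGridSet (if PySem.Set.contains valid (r - 1, c) then
        pvGridSet (if PySem.Set.contains valid (r, c + 1) then
          pvGridSet (if PySem.Set.contains valid (r, c - 1) then pvGridSet f r (c - 1) else f)
            r (c + 1)
          else (if PySem.Set.contains valid (r, c - 1) then pvGridSet f r (c - 1) else f))
        (r - 1) c
        else (if PySem.Set.contains valid (r, c + 1) then
          pvGridSet (if PySem.Set.contains valid (r, c - 1) then pvGridSet f r (c - 1) else f)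
            r (c + 1)
          else (if PySem.Set.contains valid (r, c - 1) then pvGridSet f r (c - 1) else f)))
      (r + 1) c
      else (if PySem.Set.contains valid (r - 1, c) then
        pvGridSet (if PySem.Set.contains valid (r, c + 1) then
          pvGridSet (if PySem.Set.contains valid (r, c - 1) then pvGridSet f r (c - 1) else f)
            r (c + 1)
          else (if PySem.Set.contains valid (r, c - 1) then pvGridSet f r (c - 1) else f))
        (r - 1) c
        else (if PySem.Set.contains valid (r, c + 1) then
          pvGridSet (if PySem.Set.contains valid (r, c - 1) then pvGridSet f r (c - 1) else f)
            r (c + 1)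
          else (if PySem.Set.contains valid (r, c - 1) then pvGridSet f r (c - 1) else f))))
    from rfl]
  rw [hg4 p hp, hg3 p hp, hg2 p hp, hg1 p hp]
  by_cases hmem : ((r, c) : Int × Int) ∈ pvNbrs p
  · have hcont : (pvNbrs p).contains ((r, c) : Int × Int) = true :=
      List.contains_iff_mem.mpr hmem
    rw [hcont]
    have hp' : p ∈ pvNbrs ((r, c) : Int × Int) := (pvNbrs_symm p (r, c)).mp hmem
    simp only [pvNbrs, List.mem_cons, List.not_mem_nil, or_false] at hp'
    rcases hp' with h | h | h | h <;> simp [h]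
  · have hcont : (pvNbrs p).contains ((r, c) : Int × Int) = false :=
      Bool.eq_false_iff.mpr (fun hc => hmem (List.contains_iff_mem.mp hc))
    rw [hcont]
    have h1 : (p == ((r : Int), c - 1)) = false := by
      apply beq_eq_false_iff_ne.mpr
      intro h; apply hmem; rw [h]
      simp [pvNbrs, Prod.ext_iff]
    have h2 : (p == ((r : Int), c + 1)) = false := by
      apply beq_eq_false_iff_ne.mpr
      intro h; apply hmem; rw [h]
      simp [pvNbrs, Prod.ext_iff]
    have h3 : (p == (r - 1, c)) = false := by
      apply beq_eq_false_iff_ne.mpr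
      intro h; apply hmem; rw [h]
      simp [pvNbrs, Prod.ext_iff]
    have h4 : (p == (r + 1, c)) = false := by
      apply beq_eq_false_iff_ne.mpr
      intro h; apply hmem; rw [h]
      simp [pvNbrs, Prod.ext_iff]
    simp [h1, h2, h3, h4]

-- the conditional-kill fold used by the initialisation
theorem get_foldl_killIf (rows columns : Int) (cond : Int × Int → Bool) :
    ∀ (l : List (Int × Int)), (∀ q ∈ l, pvInGrid rows columns q = true) →
    ∀ (g : List (List Bool)), GridDims rows.toNat columns.toNat g →
      GridDims rows.toNat columns.toNat
        (l.foldl (fun g q => if cond q then pvGridSet g q.1 q.2 else g) g) ∧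
      ∀ p, pvInGrid rows columns p = true →
        pvGridGet (l.foldl (fun g q => if cond q then pvGridSet g q.1 q.2 else g) g) p.1 p.2 =
          (pvGridGet g p.1 p.2 && !(l.any (fun q => q == p && cond q))) := by
  intro l
  induction l with
  | nil => intro _ g hg; exact ⟨hg, fun p _ => by simp⟩
  | cons q0 t ih =>
    intro hl g hg
    have hq0 : pvInGrid rows columns q0 = true := hl q0 (by simp)
    have hg1 : GridDims rows.toNat columns.toNat
        (if cond q0 then pvGridSet g q0.1 q0.2 else g) := by
      split
      · exact GridDims_set _ _ _ hg _ _
      · exact hg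
    obtain ⟨hd, hget⟩ := ih (fun q hq => hl q (by simp [hq])) _ hg1
    refine ⟨hd, ?_⟩
    intro p hp
    rw [List.foldl_cons, hget p hp]
    have hstep : pvGridGet (if cond q0 then pvGridSet g q0.1 q0.2 else g) p.1 p.2 =
        (pvGridGet g p.1 p.2 && !(q0 == p && cond q0)) := by
      by_cases hc : cond q0 = true
      · rw [if_pos hc]
        have := pvGridGet_set rows columns g hg p q0.1 q0.2 (by simpa using hq0) hp
        rw [this]
        by_cases hpq : p = q0
        · simp [hpq, hc]
        · have hne : (q0 == p) = false :=
            beq_eq_false_iff_ne.mpr (fun h => hpq h.symm)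
          simp [hpq, hne]
      · have hc' : cond q0 = false := Bool.eq_false_iff.mpr hc
        rw [if_neg hc]
        simp [hc']
    rw [hstep]
    simp [List.any_cons, Bool.not_or, Bool.and_assoc]

theorem any_beq_and (l : List (Int × Int)) (p : Int × Int) (cond : Int × Int → Bool)
    (hp : p ∈ l) : l.any (fun q => q == p && cond q) = cond p := by
  cases hc : cond p with
  | false =>
    apply Bool.eq_false_iff.mpr
    intro h
    obtain ⟨q, hq, hqq⟩ := List.any_eq_true.mp h
    obtain ⟨hq1, hq2⟩ := Bool.and_eq_true_iff.mp hqq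
    rw [beq_iff_eq] at hq1
    rw [hq1] at hq2
    exact absurd hq2 (by simp [hc])
  | true =>
    exact List.any_eq_true.mpr ⟨p, hp, by simp [hc]⟩

-- initialisation
theorem pvInitA_eq (rows columns : Int) (dead : List (Int × Int)) :
    pvInitA rows columns dead =
      (pvCells rows.toNat columns.toNat).foldl (fun st p =>
        (PySem.Set.add st.1 p,
         if dead.contains p then pvGridSet st.2 p.1 p.2 else st.2))
        (PySem.Set.empty, List.replicate rows.toNat (List.replicate columns.toNat true)) := by
  rw [foldl_cells]
  rfl

theorem pvInitA_fst (rows columns : Int) (dead : List (Int × Int)) :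
    (pvInitA rows columns dead).1 = PySem.Set.ofList (pvCells rows.toNat columns.toNat) := by
  rw [pvInitA_eq, PySem.List.foldl_prod_mk (f := fun s (p : Int × Int) => PySem.Set.add s p)
    (g := fun g2 (p : Int × Int) => if dead.contains p then pvGridSet g2 p.1 p.2 else g2),
    PySem.Set.ofList_eq_foldl]
  rfl

theorem pvInitA_snd (rows columns : Int) (dead : List (Int × Int)) :
    (pvInitA rows columns dead).2 =
      (pvCells rows.toNat columns.toNat).foldl (fun g2 p =>
        if dead.contains p then pvGridSet g2 p.1 p.2 else g2)
        (List.replicate rows.toNat (List.replicate columns.toNat true)) := by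
  rw [pvInitA_eq, PySem.List.foldl_prod_mk (f := fun s (p : Int × Int) => PySem.Set.add s p)
    (g := fun g2 (p : Int × Int) => if dead.contains p then pvGridSet g2 p.1 p.2 else g2)]

theorem pvInitA_valid (rows columns : Int) (dead : List (Int × Int)) (q : Int × Int) :
    PySem.Set.contains (pvInitA rows columns dead).1 q = pvInGrid rows columns q := by
  rw [pvInitA_fst]
  by_cases h : pvInGrid rows columns q = true
  · rw [h]
    exact (PySem.Set.contains_iff _ _).mpr
      ((PySem.Set.mem_ofList _ _).mpr ((mem_pvCells rows columns q).mpr h))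
  · rw [Bool.eq_false_iff.mpr h]
    apply Bool.eq_false_iff.mpr
    intro hc
    exact h ((mem_pvCells rows columns q).mp
      ((PySem.Set.mem_ofList _ _).mp ((PySem.Set.contains_iff _ _).mp hc)))

theorem pvInitA_field (rows columns : Int) (dead : List (Int × Int)) :
    GridDims rows.toNat columns.toNat (pvInitA rows columns dead).2 ∧
    ∀ p, pvInGrid rows columns p = true →
      pvGridGet (pvInitA rows columns dead).2 p.1 p.2 = !(pvS0 rows columns dead p) := by
  obtain ⟨hd, hg⟩ := get_foldl_killIf rows columns (fun q => dead.contains q)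
    (pvCells rows.toNat columns.toNat)
    (fun q hq => (mem_pvCells rows columns q).mp hq)
    (List.replicate rows.toNat (List.replicate columns.toNat true))
    (GridDims_replicate _ _)
  rw [pvInitA_snd]
  refine ⟨hd, ?_⟩
  intro p hp
  rw [hg p hp, pvGridGet_replicate rows columns p hp,
    any_beq_and _ p _ ((mem_pvCells rows columns p).mpr hp)]
  simp [pvS0, hp]

-- one day of A
theorem spread_fold (rows columns : Int) (valid : PySem.Set (Int × Int))
    (hvalid : ∀ q, PySem.Set.contains valid q = pvInGrid rows columns q)
    (S : Int × Int → Bool) (g : List (List Bool))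
    (hget : ∀ p, pvInGrid rows columns p = true → pvGridGet g p.1 p.2 = !(S p)) :
    ∀ (l : List (Int × Int)), (∀ q ∈ l, pvInGrid rows columns q = true) →
    ∀ (f : List (List Bool)) (a : Int), GridDims rows.toNat columns.toNat f →
      GridDims rows.toNat columns.toNat
        ((l.foldl (fun st p => pvSpreadCell valid g p.1 p.2 st) (f, a)).1) ∧
      (∀ p, pvInGrid rows columns p = true →
        pvGridGet ((l.foldl (fun st p => pvSpreadCell valid g p.1 p.2 st) (f, a)).1) p.1 p.2 =
          (pvGridGet f p.1 p.2 && !(l.any (fun q => S q && (pvNbrs p).contains q)))) ∧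
      (l.foldl (fun st p => pvSpreadCell valid g p.1 p.2 st) (f, a)).2 =
        a + (l.countP (fun q => !(S q)) : Int) := by
  intro l
  induction l with
  | nil => intro _ f a hf; exact ⟨hf, fun p _ => by simp, by simp⟩
  | cons q0 t ih =>
    intro hl f a hf
    have hq0 : pvInGrid rows columns q0 = true := hl q0 (by simp)
    have hread : pvGridGet g q0.1 q0.2 = !(S q0) := hget q0 hq0
    simp only [List.foldl_cons]
    by_cases hS0 : S q0 = true
    · have hcell : pvSpreadCell valid g q0.1 q0.2 (f, a) = (pvKill valid f q0.1 q0.2, a) := by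
        simp [pvSpreadCell, hread, hS0]
      obtain ⟨hkd, hkg⟩ := pvKill_spec rows columns valid hvalid f hf q0.1 q0.2
      obtain ⟨ihd, ihg, ihc⟩ := ih (fun q hq => hl q (by simp [hq]))
        (pvKill valid f q0.1 q0.2) a hkd
      rw [hcell]
      refine ⟨ihd, ?_, ?_⟩
      · intro p hp
        rw [ihg p hp, hkg p hp]
        simp [List.any_cons, hS0, Bool.not_or, Bool.and_assoc]
      · rw [ihc]
        have hq0' : (fun q => !(S q)) q0 = false := by simp [hS0]
        simp [List.countP_cons, hq0']
    · have hS0' : S q0 = false := Bool.eq_false_iff.mpr hS0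
      have hcell : pvSpreadCell valid g q0.1 q0.2 (f, a) = (f, a + 1) := by
        simp [pvSpreadCell, hread, hS0']
      obtain ⟨ihd, ihg, ihc⟩ := ih (fun q hq => hl q (by simp [hq])) f (a + 1) hf
      rw [hcell]
      refine ⟨ihd, ?_, ?_⟩
      · intro p hp
        rw [ihg p hp]
        simp [List.any_cons, hS0', Bool.not_or]
      · rw [ihc]
        have hq0' : (fun q => !(S q)) q0 = true := by simp [hS0']
        rw [List.countP_cons]
        simp only [hq0', if_pos]
        push_cast
        ring
  
theorem pvSpread_spec (rows columns : Int) (valid : PySem.Set (Int × Int))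
    (hvalid : ∀ q, PySem.Set.contains valid q = pvInGrid rows columns q)
    (S : Int × Int → Bool) (hS : ∀ p, S p = true → pvInGrid rows columns p = true)
    (g : List (List Bool)) (hdims : GridDims rows.toNat columns.toNat g)
    (hget : ∀ p, pvInGrid rows columns p = true → pvGridGet g p.1 p.2 = !(S p)) :
    GridDims rows.toNat columns.toNat (pvSpread valid g g).1 ∧
    (∀ p, pvInGrid rows columns p = true →
      pvGridGet (pvSpread valid g g).1 p.1 p.2 = !(pvSnext rows columns S p)) ∧
    (pvSpread valid g g).2 = pvAlive rows columns S := by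
  have hinner : ∀ r ∈ List.range rows.toNat, (List.getD g r []).length = columns.toNat := by
    intro r hr
    rw [List.mem_range] at hr
    have : r < g.length := by rw [hdims.1]; exact hr
    rw [List.getD_eq_getElem?_getD, List.getElem?_eq_getElem this]
    exact hdims.2 _ (List.getElem_mem this)
  have hconv : pvSpread valid g g = (pvCells rows.toNat columns.toNat).foldl
      (fun st p => pvSpreadCell valid g p.1 p.2 st) (g, 0) := by
    rw [pvSpread, hdims.1, foldl_cells]
    apply PySem.List.foldl_congr_mem _ _ _ _ ?_
    intro acc x hx
    rw [hinner x hx]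
  rw [hconv]
  obtain ⟨hd, hgets, hcnt⟩ := spread_fold rows columns valid hvalid S g hget
    (pvCells rows.toNat columns.toNat) (fun q hq => (mem_pvCells rows columns q).mp hq)
    g 0 hdims
  refine ⟨hd, ?_, ?_⟩
  · intro p hp
    rw [hgets p hp, hget p hp]
    have hX : (pvCells rows.toNat columns.toNat).any
        (fun q => S q && (pvNbrs p).contains q) = (pvNbrs p).any S := by
      by_cases h : (pvNbrs p).any S = true
      · rw [h]
        obtain ⟨q, hq, hSq⟩ := List.any_eq_true.mp h
        apply List.any_eq_true.mpr
        exact ⟨q, (mem_pvCells rows columns q).mpr (hS q hSq), by simp [hSq, hq]⟩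
      · rw [Bool.eq_false_iff.mpr h]
        apply Bool.eq_false_iff.mpr
        intro hc
        obtain ⟨q, _, hq⟩ := List.any_eq_true.mp hc
        obtain ⟨hSq, hcont⟩ := Bool.and_eq_true_iff.mp hq
        exact h (List.any_eq_true.mpr ⟨q, List.contains_iff_mem.mp hcont, hSq⟩)
    rw [hX]
    simp [pvSnext, hp, Bool.not_or]
  · rw [hcnt, pvAlive]
    simp

theorem pvSnext_sub (rows columns : Int) (S : Int × Int → Bool)
    (hS : ∀ p, S p = true → pvInGrid rows columns p = true) :
    ∀ p, pvSnext rows columns S p = true → pvInGrid rows columns p = true := by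
  intro p hp
  rcases Bool.or_eq_true_iff.mp hp with h | h
  · exact hS p h
  · exact (Bool.and_eq_true_iff.mp h).1

theorem pvWhileA_eq (rows columns : Int) (valid : PySem.Set (Int × Int))
    (hvalid : ∀ q, PySem.Set.contains valid q = pvInGrid rows columns q) :
    ∀ (k : Nat) (g : List (List Bool)) (S : Int × Int → Bool),
      (∀ p, S p = true → pvInGrid rows columns p = true) →
      GridDims rows.toNat columns.toNat g →
      (∀ p, pvInGrid rows columns p = true → pvGridGet g p.1 p.2 = !(S p)) →
      pvWhileA valid (k + 1) g = pvAlive rows columns ((pvSnext rows columns)^[k] S) := by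
  intro k
  induction k with
  | zero =>
    intro g S hS hd hget
    obtain ⟨-, -, hc⟩ := pvSpread_spec rows columns valid hvalid S hS g hd hget
    simpa [show pvWhileA valid 1 g = (pvSpread valid g g).2 from rfl] using hc
  | succ n ih =>
    intro g S hS hd hget
    obtain ⟨hd', hget', -⟩ := pvSpread_spec rows columns valid hvalid S hS g hd hget
    have hstep : pvWhileA valid (n + 1 + 1) g = pvWhileA valid (n + 1) (pvSpread valid g g).1 :=
      rfl
    rw [hstep, ih _ _ (pvSnext_sub rows columns S hS) hd' hget',
      ← Function.iterate_succ_apply]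

-- B: the BFS invariant
def BfsInv (rows columns : Int) (S : Int × Int → Bool) (d fr : List (Int × Int)) : Prop :=
  d.Nodup ∧ (∀ p, p ∈ d ↔ S p = true) ∧ (∀ p ∈ fr, p ∈ d) ∧
  (∀ q, q ∈ d → q ∉ fr → ∀ p ∈ pvNbrs q, pvInGrid rows columns p = true → p ∈ d)

theorem bfs_init (rows columns : Int) (dead : List (Int × Int)) :
    BfsInv rows columns (pvS0 rows columns dead)
      (PySem.Set.ofList (dead.filter (pvInGrid rows columns)))
      (PySem.Set.ofList (dead.filter (pvInGrid rows columns))) := by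
  refine ⟨PySem.Set.nodup_ofList _, ?_, fun p hp => hp, ?_⟩
  · intro p
    rw [PySem.Set.mem_ofList, List.mem_filter]
    simp only [pvS0, Bool.and_eq_true]
    constructor
    · rintro ⟨h1, h2⟩; exact ⟨h2, List.contains_iff_mem.mpr h1⟩
    · rintro ⟨h1, h2⟩; exact ⟨List.contains_iff_mem.mp h2, h1⟩
  · intro q hq hnq; exact absurd hq hnq

theorem bfs_step (rows columns : Int) (S : Int × Int → Bool)
    (hS : ∀ p, S p = true → pvInGrid rows columns p = true)
    (d fr : List (Int × Int)) (h : BfsInv rows columns S d fr) :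
    BfsInv rows columns (pvSnext rows columns S)
      (pvBfsStep rows columns (d, fr)).1 (pvBfsStep rows columns (d, fr)).2 := by
  obtain ⟨hnd, hmem, hfrd, hcl⟩ := h
  have hcont : ∀ q, PySem.Set.contains d q = true ↔ S q = true := by
    intro q; rw [PySem.Set.contains_iff]; exact hmem q
  have hnf : (pvBfsStep rows columns (d, fr)).2 =
      PySem.Set.ofList ((fr.flatMap pvNbrs).filter
        (fun q => pvInGrid rows columns q && !(PySem.Set.contains d q))) := by
    simp only [pvBfsStep]
    rw [PySem.Set.ofList_eq_foldl,
      ← PySem.List.foldl_if_eq_foldl_filter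
        (p := fun q => pvInGrid rows columns q && !(PySem.Set.contains d q))
        (f := PySem.Set.add),
      List.foldl_flatMap]
    rfl
  have hfst : (pvBfsStep rows columns (d, fr)).1 =
      PySem.Set.union d (pvBfsStep rows columns (d, fr)).2 := rfl
  have hnfmem : ∀ p, p ∈ (pvBfsStep rows columns (d, fr)).2 ↔
      (pvInGrid rows columns p = true ∧ S p = false ∧ ∃ q ∈ fr, p ∈ pvNbrs q) := by
    intro p
    rw [hnf, PySem.Set.mem_ofList, List.mem_filter, List.mem_flatMap]
    constructor
    · rintro ⟨⟨q, hq, hpq⟩, hcond⟩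
      obtain ⟨h1, h2⟩ := Bool.and_eq_true_iff.mp hcond
      refine ⟨h1, ?_, q, hq, hpq⟩
      cases hSp : S p with
      | false => rfl
      | true =>
        exfalso
        have := (hcont p).mpr hSp
        rw [this] at h2
        simp at h2
    · rintro ⟨h1, h2, q, hq, hpq⟩
      refine ⟨⟨q, hq, hpq⟩, ?_⟩
      apply Bool.and_eq_true_iff.mpr
      refine ⟨h1, ?_⟩
      cases hc : PySem.Set.contains d p with
      | false => rfl
      | true =>
        exfalso
        have := (hcont p).mp hc
        rw [this] at h2
        exact absurd h2 (by simp)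
  refine ⟨?_, ?_, ?_, ?_⟩
  · rw [hfst]; exact PySem.Set.nodup_union _ _ hnd
  · intro p
    rw [hfst, PySem.Set.mem_union, hmem p, hnfmem p]
    simp only [pvSnext, Bool.or_eq_true, Bool.and_eq_true, List.any_eq_true]
    constructor
    · rintro (h | ⟨h1, _, q, hq, hpq⟩)
      · exact Or.inl h
      · refine Or.inr ⟨h1, q, (pvNbrs_symm p q).mpr hpq, (hmem q).mp (hfrd q hq)⟩
    · rintro (h | ⟨h1, q, hqnb, hSq⟩)
      · exact Or.inl h
      · cases hSp : S p with
        | true => exact Or.inl rfl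
        | false =>
          right
          have hqd : q ∈ d := (hmem q).mpr hSq
          by_cases hqfr : q ∈ fr
          · exact ⟨h1, rfl, q, hqfr, (pvNbrs_symm q p).mpr hqnb⟩
          · exfalso
            have := hcl q hqd hqfr p ((pvNbrs_symm q p).mpr hqnb) h1
            rw [hmem p] at this
            rw [this] at hSp
            exact absurd hSp (by simp)
  · intro p hp
    rw [hfst, PySem.Set.mem_union]
    exact Or.inr hp
  · intro q hq hqnf p hpn hpg
    rw [hfst, PySem.Set.mem_union] at hq ⊢
    rcases hq with hqd | hqnf2
    · by_cases hpd : p ∈ d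
      · exact Or.inl hpd
      · by_cases hqfr : q ∈ fr
        · right
          apply (hnfmem p).mpr
          refine ⟨hpg, ?_, q, hqfr, hpn⟩
          cases hSp : S p with
          | false => rfl
          | true => exact absurd ((hmem p).mpr hSp) hpd
        · exact Or.inl (hcl q hqd hqfr p hpn hpg)
    · exact absurd hqnf2 hqnf

theorem Sk_sub (rows columns : Int) (dead : List (Int × Int)) :
    ∀ k p, (pvSnext rows columns)^[k] (pvS0 rows columns dead) p = true →
      pvInGrid rows columns p = true := by
  intro k
  induction k with
  | zero => intro p hp; exact (Bool.and_eq_true_iff.mp hp).1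
  | succ n ih =>
    intro p hp
    rw [Function.iterate_succ_apply'] at hp
    exact pvSnext_sub rows columns _ ih p hp

theorem bfs_iter (rows columns : Int) (dead : List (Int × Int)) (k : Nat) :
    BfsInv rows columns ((pvSnext rows columns)^[k] (pvS0 rows columns dead))
      ((List.range k).foldl (fun st _ => pvBfsStep rows columns st)
        (PySem.Set.ofList (dead.filter (pvInGrid rows columns)),
         PySem.Set.ofList (dead.filter (pvInGrid rows columns)))).1
      ((List.range k).foldl (fun st _ => pvBfsStep rows columns st)
        (PySem.Set.ofList (dead.filter (pvInGrid rows columns)),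
         PySem.Set.ofList (dead.filter (pvInGrid rows columns)))).2 := by
  induction k with
  | zero => simpa using bfs_init rows columns dead
  | succ n ih =>
    rw [List.range_succ, List.foldl_append, List.foldl_cons, List.foldl_nil,
      Function.iterate_succ_apply']
    have := bfs_step rows columns _ (Sk_sub rows columns dead n) _ _ ih
    simpa using this

theorem count_eq (rows columns : Int) (S : Int × Int → Bool)
    (hS : ∀ p, S p = true → pvInGrid rows columns p = true)
    (d : List (Int × Int)) (hnd : d.Nodup) (hmem : ∀ p, p ∈ d ↔ S p = true) :
    pvAlive rows columns S =
      ((rows.toNat * columns.toNat : Nat) : Int) - (d.length : Int) := by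
  have hnd2 : ((pvCells rows.toNat columns.toNat).filter S).Nodup :=
    (nodup_pvCells _ _).filter _
  have hlen : d.length = ((pvCells rows.toNat columns.toNat).filter S).length := by
    rw [← List.toFinset_card_of_nodup hnd, ← List.toFinset_card_of_nodup hnd2]
    congr 1
    ext p
    simp only [List.mem_toFinset, List.mem_filter]
    rw [hmem p]
    constructor
    · intro h; exact ⟨(mem_pvCells rows columns p).mpr (hS p h), h⟩
    · exact fun h => h.2
  have hsplit := List.length_eq_countP_add_countP (p := S)
    (l := pvCells rows.toNat columns.toNat)
  have hcc : (pvCells rows.toNat columns.toNat).countP (fun a => decide ¬(S a = true)) =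
      (pvCells rows.toNat columns.toNat).countP (fun p => !(S p)) := by
    apply List.countP_congr
    intro a _
    simp
  rw [length_pvCells, hcc] at hsplit
  rw [pvAlive, hlen, ← List.countP_eq_length_filter]
  omega

-- ===== VERDICT (by name: the statement is the Claim_ definition above) =====
theorem strawberries_spec : Claim_equal_strawberries := by
  intro rows columns days dead _hdom hpre
  unfold Spec_strawberries
  obtain ⟨hp1, hp2⟩ := hpre
  have hS0sub : ∀ p, pvS0 rows columns dead p = true → pvInGrid rows columns p = true :=
    fun p hp => (Bool.and_eq_true_iff.mp hp).1
  have hvalid := pvInitA_valid rows columns dead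
  obtain ⟨hd0, hg0⟩ := pvInitA_field rows columns dead
  obtain ⟨hnd, hmem, -, -⟩ := bfs_iter rows columns dead days.toNat
  have hA := pvWhileA_eq rows columns _ hvalid days.toNat _ _ hS0sub hd0 hg0
  have hB := count_eq rows columns _ (Sk_sub rows columns dead days.toNat) _ hnd hmem
  have hfuel : (days + 1).toNat = days.toNat + 1 := by omega
  have hRC : ((rows.toNat * columns.toNat : Nat) : Int) = rows * columns := by
    push_cast
    rw [Int.toNat_of_nonneg (by omega), Int.toNat_of_nonneg (by omega)]
  simp only [strawberries, strawberries_alt, if_pos hp1, if_pos hp2]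
  rw [hfuel, hA, hB, hRC]
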